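-- pv_equiv track=rewrite | github.com/katieMlyons/bioinf_algorithms | src/dna.py | approximate_pattern_matching
-- ===== SOURCE A (Python) =====
-- def hamming_distance(p:str, q:str) -> int:
--     if len(p) != len(q):
--         return False
--     else:
--         return sum(c1 != c2 for c1, c2 in zip(p, q))
--
-- def approximate_pattern_matching(pattern:str, text:str, d:int) -> list[int]:
--     '''list of indices of kmers within hamming distance d of a pattern'''
--     kmers = set() #don't need to recalculate good kmers
--     idxlist = []
--     k = len(pattern)
--     for i in range(len(text) - k + 1):
--         kmer = text[i:i + k]
--         if kmer in kmers:
--             idxlist.append(i)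
--         elif hamming_distance(kmer, pattern) <= d:
--             kmers.add(kmer)
--             idxlist.append(i)
--     return idxlist
-- ===== SOURCE B (Python) =====
-- def approximate_pattern_matching(pattern: str, text: str, d: int) -> list[int]:
--     '''list of indices of kmers within hamming distance d of a pattern'''
--     m = len(text) - len(pattern) + 1
--     counts = [0] * m
--     for j, pj in enumerate(pattern):
--         counts = [c + (text[i + j] != pj) for i, c in enumerate(counts)]
--     return [i for i, c in enumerate(counts) if c <= d]
-- ===== Notes on version B (the rewrite author's own statement) =====
-- stated objective: alternative
-- what changed: B drops A's per-window slicing, hamming_distance calls and memo set; it accumulates mismatch counts for all windows column-by-column (one pass over all window starts per pattern position) and then filters the counts, so no window string is ever built or hashed.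
import Mathlib
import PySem

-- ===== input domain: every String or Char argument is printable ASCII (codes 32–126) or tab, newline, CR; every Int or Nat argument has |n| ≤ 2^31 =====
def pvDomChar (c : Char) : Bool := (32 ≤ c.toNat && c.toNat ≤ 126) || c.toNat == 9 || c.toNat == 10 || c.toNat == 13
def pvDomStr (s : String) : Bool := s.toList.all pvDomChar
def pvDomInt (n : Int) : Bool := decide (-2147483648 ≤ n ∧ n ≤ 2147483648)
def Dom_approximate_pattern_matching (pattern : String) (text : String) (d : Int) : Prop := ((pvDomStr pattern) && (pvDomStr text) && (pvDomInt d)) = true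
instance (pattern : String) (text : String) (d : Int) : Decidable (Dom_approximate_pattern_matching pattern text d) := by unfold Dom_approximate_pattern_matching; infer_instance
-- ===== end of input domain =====

-- B replaces A's window-by-window scan with a memo set by a column-wise mismatch-count accumulation
-- (one pass per pattern position over all windows), then filters the counts: alternative traversal, same results.

-- ===== PORT A =====
-- Python's hamming_distance returns False when the lengths differ; its only use here is
-- 'hamming_distance(...) <= d', where False compares as 0, so that branch is ported as 0 (exact for this use).
def hamming_distance (p : String) (q : String) : Int :=
  if PySem.Str.len p ≠ PySem.Str.len q then 0
  else ((p.toList.zip q.toList).countP (fun c => !(c.1 == c.2)) : Int)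

def approximate_pattern_matching (pattern : String) (text : String) (d : Int) : List Int :=
  let k : Int := PySem.Str.len pattern
  let st := (PySem.List.pyRange 0 (PySem.Str.len text - k + 1) 1).foldl
    (fun (st : PySem.Set String × List Int) i =>
      let kmer := PySem.Str.slice text (some i) (some (i + k))
      if PySem.Set.contains st.1 kmer then (st.1, st.2 ++ [i])
      else if hamming_distance kmer pattern ≤ d then (PySem.Set.add st.1 kmer, st.2 ++ [i])
      else st)
    ((PySem.Set.empty : PySem.Set String), ([] : List Int))
  st.2

-- ===== PORT B =====
def approximate_pattern_matching_alt (pattern : String) (text : String) (d : Int) : List Int :=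
  let m : Int := PySem.Str.len text - PySem.Str.len pattern + 1
  let counts0 : List Int := List.replicate m.toNat 0  -- [0] * m (empty for m ≤ 0, as in Python)
  let counts := (PySem.List.enumerate pattern.toList 0).foldl
    (fun cs (jp : Int × Char) =>
      (PySem.List.enumerate cs 0).map (fun ic =>
        ic.2 + (if PySem.Str.pyGet? text (ic.1 + jp.1) ≠ some jp.2 then 1 else 0)))
    counts0
  (PySem.List.enumerate counts 0).filterMap (fun ic => if ic.2 ≤ d then some ic.1 else none)

-- ===== PRECONDITION & SPEC =====
def Spec_approximate_pattern_matching (pattern : String) (text : String) (d : Int) (out : List Int) : Prop := out = approximate_pattern_matching_alt pattern text d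
instance (pattern : String) (text : String) (d : Int) (out : List Int) : Decidable (Spec_approximate_pattern_matching pattern text d out) := by unfold Spec_approximate_pattern_matching; infer_instance

-- ===== CLAIM (what is proved, stated in full; the proofs are below) =====
def Claim_equal_approximate_pattern_matching : Prop := ∀ (pattern : String) (text : String) (d : Int), Dom_approximate_pattern_matching pattern text d → Spec_approximate_pattern_matching pattern text d (approximate_pattern_matching pattern text d)

-- ===== LEMMAS AND PROOFS =====

-- the per-position mismatch indicator and the column-wise partial mismatch count B accumulates
def pvInd (text : String) (c : Char) (ix : Int) : Int :=
  if PySem.Str.pyGet? text ix ≠ some c then 1 else 0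

def pvF (text : String) (ps : List Char) (s : Int) (i : Int) : Int :=
  match ps with
  | [] => 0
  | c :: cs => pvInd text c (i + s) + pvF text cs (s + 1) i

theorem pv_enumerate_map (M : Nat) (g : Nat → Int) :
    PySem.List.enumerate ((List.range M).map g) 0 = (List.range M).map (fun i : Nat => ((i : Int), g i)) := by
  apply List.ext_getElem
  · simp [PySem.List.length_enumerate]
  · intro k h1 h2
    simp [PySem.List.getElem_enumerate]

theorem pv_foldB (text : String) (ps : List Char) (M : Nat) :
    ∀ (s : Int) (g : Nat → Int),
    (PySem.List.enumerate ps s).foldl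
      (fun cs (jp : Int × Char) =>
        (PySem.List.enumerate cs 0).map (fun ic =>
          ic.2 + (if PySem.Str.pyGet? text (ic.1 + jp.1) ≠ some jp.2 then 1 else 0)))
      ((List.range M).map g)
    = (List.range M).map (fun i => g i + pvF text ps s (i : Int)) := by
  induction ps with
  | nil => intro s g; simp [PySem.List.enumerate_nil, pvF]
  | cons c cs ih =>
    intro s g
    rw [PySem.List.enumerate_cons, List.foldl_cons, pv_enumerate_map, List.map_map]
    have : ((fun ic : Int × Int =>
          ic.2 + (if PySem.Str.pyGet? text (ic.1 + (s, c).1) ≠ some (s, c).2 then 1 else 0)) ∘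
          (fun i : Nat => ((i : Int), g i)))
        = fun i : Nat => g i + pvInd text c ((i : Int) + s) := by
      funext i; simp [Function.comp, pvInd]
    rw [this, ih (s + 1) (fun i => g i + pvInd text c ((i : Int) + s))]
    apply List.map_congr_left
    intro i _
    simp [pvF, add_assoc]

theorem pv_foldA (pattern : String) (d : Int) (W : Int → String) :
    ∀ (l : List Int) (s : PySem.Set String) (acc : List Int),
    (∀ x ∈ s, hamming_distance x pattern ≤ d) →
    ((l.foldl
      (fun (st : PySem.Set String × List Int) i =>
        let kmer := W i
        if PySem.Set.contains st.1 kmer then (st.1, st.2 ++ [i])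
        else if hamming_distance kmer pattern ≤ d then (PySem.Set.add st.1 kmer, st.2 ++ [i])
        else st)
      (s, acc)).2
      = acc ++ l.filterMap (fun i => if hamming_distance (W i) pattern ≤ d then some i else none)) := by
  intro l
  induction l with
  | nil => intro s acc _; simp
  | cons i l ih =>
    intro s acc hinv
    simp only [List.foldl_cons, List.filterMap_cons]
    by_cases hc : PySem.Set.contains s (W i) = true
    · have hmem : W i ∈ s := (PySem.Set.contains_iff _ _).mp hc
      have hle : hamming_distance (W i) pattern ≤ d := hinv _ hmem
      simp only [hc, if_pos hle, if_true]
      rw [ih s (acc ++ [i]) hinv]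
      simp
    · simp only [Bool.not_eq_true] at hc
      simp only [hc, Bool.false_eq_true, if_false]
      by_cases hle : hamming_distance (W i) pattern ≤ d
      · simp only [if_pos hle]
        rw [ih (PySem.Set.add s (W i)) (acc ++ [i])]
        · simp
        · intro x hx
          rcases (PySem.Set.mem_add _ _ _).mp hx with h | h
          · exact hinv _ h
          · subst h; exact hle
      · simp only [if_neg hle]
        exact ih s acc hinv

theorem pv_pvF_eq_zip (text : String) (ps : List Char) :
    ∀ (i s : Int), 0 ≤ i + s → (i + s).toNat + ps.length ≤ text.toList.length →
    pvF text ps s i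
      = ((((text.toList.drop (i + s).toNat).take ps.length).zip ps).countP (fun c => !(c.1 == c.2)) : Int) := by
  induction ps with
  | nil => intro i s _ _; simp [pvF]
  | cons c cs ih =>
    intro i s h0 hlen
    have ha : (i + s).toNat < text.toList.length := by
      simp only [List.length_cons] at hlen; omega
    have hdrop : text.toList.drop (i + s).toNat
        = text.toList[(i + s).toNat] :: text.toList.drop ((i + s).toNat + 1) :=
      List.drop_eq_getElem_cons ha
    have hget : PySem.Str.pyGet? text (i + s) = some (text.toList[(i + s).toNat]) := by
      rw [show PySem.Str.pyGet? text (i + s) = PySem.List.pyGet? text.toList (i + s) by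
        simp [PySem.Str.pyGet?]]
      rw [PySem.List.pyGet?_of_nonneg _ h0]
      simp
    have hrec := ih i (s + 1) (by omega) (by simp only [List.length_cons] at hlen; omega)
    have hnat : (i + (s + 1)).toNat = (i + s).toNat + 1 := by omega
    rw [hnat] at hrec
    simp only [pvF, hrec, List.length_cons, hdrop, List.take_succ_cons, List.zip_cons_cons,
      List.countP_cons, pvInd, hget]
    by_cases he : text.toList[(i + s).toNat] = c
    · simp [he]
    · simp [he]
      ring

-- A's hamming distance of the i-th window equals B's accumulated column count at i
theorem pv_window (pattern text : String) (i : Nat)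
    (h : i + pattern.toList.length ≤ text.toList.length) :
    hamming_distance (PySem.Str.slice text (some (i : Int)) (some ((i : Int) + (pattern.toList.length : Int)))) pattern
      = pvF text pattern.toList 0 (i : Int) := by
  have hk : PySem.Str.len pattern = (pattern.toList.length : Int) := PySem.Str.len_eq pattern
  have hw : (PySem.Str.slice text (some (i : Int)) (some ((i : Int) + (pattern.toList.length : Int)))).toList
      = (text.toList.drop i).take pattern.toList.length := by
    rw [PySem.Str.toList_slice, PySem.Chars.slice_eq_listSlice, PySem.List.slice_natCast_add]
  have hlen : ((text.toList.drop i).take pattern.toList.length).length = pattern.toList.length := by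
    rw [List.length_take, List.length_drop]; omega
  have hz := pv_pvF_eq_zip text pattern.toList (i : Int) 0 (by omega)
    (by simp only [add_zero, Int.toNat_natCast]; omega)
  simp only [add_zero, Int.toNat_natCast] at hz
  rw [hz]
  have hne : ¬ (PySem.Str.len (PySem.Str.slice text (some (i : Int))
      (some ((i : Int) + (pattern.toList.length : Int)))) ≠ PySem.Str.len pattern) := by
    rw [PySem.Str.len_eq, hw, hlen, hk]
    simp
  rw [hamming_distance, if_neg hne, hw]

-- A is the filter of the window indices by the hamming condition (the memo set is transparent)
theorem pv_A_eq (pattern text : String) (d : Int) :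
    approximate_pattern_matching pattern text d
      = (PySem.List.pyRange 0 (PySem.Str.len text - PySem.Str.len pattern + 1) 1).filterMap
          (fun i => if hamming_distance
              (PySem.Str.slice text (some i) (some (i + PySem.Str.len pattern))) pattern ≤ d
            then some i else none) := by
  have h := pv_foldA pattern d
      (fun i => PySem.Str.slice text (some i) (some (i + PySem.Str.len pattern)))
      (PySem.List.pyRange 0 (PySem.Str.len text - PySem.Str.len pattern + 1) 1)
      PySem.Set.empty []
      (by intro x hx; exact absurd hx (List.not_mem_nil))
  simpa [approximate_pattern_matching] using h

-- B is the filter of the window indices by its accumulated column counts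
theorem pv_B_eq (pattern text : String) (d : Int) :
    approximate_pattern_matching_alt pattern text d
      = (List.range ((PySem.Str.len text - PySem.Str.len pattern + 1).toNat)).filterMap
          (fun i : Nat => if pvF text pattern.toList 0 (i : Int) ≤ d then some ((i : Int)) else none) := by
  have h0 : (List.replicate ((PySem.Str.len text - PySem.Str.len pattern + 1).toNat) (0 : Int))
      = (List.range ((PySem.Str.len text - PySem.Str.len pattern + 1).toNat)).map
          (fun _ => (0 : Int)) := by
    rw [List.map_const', List.length_range]
  simp only [approximate_pattern_matching_alt, h0,
    pv_foldB text pattern.toList ((PySem.Str.len text - PySem.Str.len pattern + 1).toNat) 0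
      (fun _ => (0 : Int)),
    pv_enumerate_map, List.filterMap_map]
  apply List.filterMap_congr
  intro i _
  simp

theorem approximate_pattern_matching_eq (pattern text : String) (d : Int) :
    approximate_pattern_matching pattern text d = approximate_pattern_matching_alt pattern text d := by
  rw [pv_A_eq, pv_B_eq]
  simp only [PySem.Str.len_eq, PySem.List.pyRange_one, sub_zero, List.filterMap_map]
  apply List.filterMap_congr
  intro i hi
  have hi' : i < (((text.toList.length : Int)) - (pattern.toList.length : Int) + 1).toNat :=
    List.mem_range.mp hi
  have hle : i + pattern.toList.length ≤ text.toList.length := by omega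
  simp only [Function.comp, zero_add]
  rw [pv_window pattern text i hle]

-- ===== VERDICT (by name: the statement is the Claim_ definition above) =====
theorem approximate_pattern_matching_spec : Claim_equal_approximate_pattern_matching := by
  intro pattern text d _
  unfold Spec_approximate_pattern_matching
  exact approximate_pattern_matching_eq pattern text d
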